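-- pv_equiv track=rewrite | github.com/poter0501/Algorithm | 프로그래머스/2/131127. 할인 행사/할인 행사.py | solution
-- ===== SOURCE A (Python) =====
-- def solution(want, number, discount):
--     answer = 0
--     for i in range(0, len(discount)-9):
--         sub_discount=discount[i:i+10]
--         result=True
--         for i, w in enumerate(want):
--             if number[i]!=sub_discount.count(w):
--                 result=False
--                 break
--         if result:
--             answer+=1
--
--     return answer
-- ===== SOURCE B (Python) =====
-- def solution(want, number, discount):
--     # Requirements as a dict; conflicting duplicate wants can never all be met.
--     need = {}
--     for w, n in zip(want, number):
--         if w in need and need[w] != n: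
--             return 0
--         need[w] = n
--     if len(discount) < 10:
--         return 0
--     # counts of the first 10-day window, then slide it one day at a time
--     cnt = {}
--     for item in discount[:10]:
--         cnt[item] = cnt.get(item, 0) + 1
--     answer = 0
--     for i in range(len(discount) - 9):
--         if i > 0:
--             out = discount[i - 1]
--             cnt[out] = cnt.get(out, 0) - 1
--             inc = discount[i + 9]
--             cnt[inc] = cnt.get(inc, 0) + 1
--         if all(cnt.get(k, 0) == v for k, v in need.items()):
--             answer += 1
--     return answer
-- ===== Notes on version B (the rewrite author's own statement) =====
-- stated objective: faster
-- what changed: A slices out every 10-day window and recounts it once per want entry; B builds a requirements dict once and maintains a single sliding counter dict, updating it by one decrement/increment per window and checking the (deduplicated) requirements against it.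
-- outside the precondition, e.g. on solution(['a', 'b'], [5], ['a', 'a', 'a', 'a', 'a', 'a', 'a', 'a', 'a', 'a']): A returns 0, B returns 0
import Mathlib
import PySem

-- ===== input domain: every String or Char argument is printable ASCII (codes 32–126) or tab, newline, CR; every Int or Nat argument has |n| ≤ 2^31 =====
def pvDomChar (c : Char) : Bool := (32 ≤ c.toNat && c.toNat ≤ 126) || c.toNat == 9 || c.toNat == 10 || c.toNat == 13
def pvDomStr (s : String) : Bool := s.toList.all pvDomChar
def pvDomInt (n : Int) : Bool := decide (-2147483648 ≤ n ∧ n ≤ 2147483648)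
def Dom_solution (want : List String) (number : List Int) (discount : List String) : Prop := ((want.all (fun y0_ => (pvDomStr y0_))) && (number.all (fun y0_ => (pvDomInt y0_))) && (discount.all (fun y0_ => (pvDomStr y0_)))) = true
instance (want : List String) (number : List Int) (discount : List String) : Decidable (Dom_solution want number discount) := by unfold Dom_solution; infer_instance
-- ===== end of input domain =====

-- B replaces A's per-window slice-and-recount (a fresh count over the window for every want entry)
-- by a requirements dict plus one sliding counter dict updated incrementally per window.

-- ===== PORT A =====
-- inner 'for i, w in enumerate(want): if number[i] != sub_discount.count(w): result=False; break'
def pvCheckA (number : List Int) (sub : List String) : List (Int × String) → Bool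
  | [] => true
  | (j, w) :: rest =>
    if PySem.List.pyGetD number j 0 ≠ (PySem.List.count sub w : Int) then false
    else pvCheckA number sub rest

def solution (want : List String) (number : List Int) (discount : List String) : Int :=
  (PySem.List.pyRange 0 ((discount.length : Int) - 9)).foldl
    (fun answer i =>
      if pvCheckA number (PySem.List.slice discount (some i) (some (i + 10))) (PySem.List.enumerate want)
      then answer + 1 else answer) 0

-- ===== PORT B =====
-- 'for w, n in zip(want, number): if w in need and need[w] != n: return 0; need[w] = n'
-- (none = the early 'return 0' on a conflicting duplicate want)
def pvNeed (pairs : List (String × Int)) (need : PySem.Dict String Int) : Option (PySem.Dict String Int) :=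
  match pairs with
  | [] => some need
  | (w, n) :: rest =>
    if need.contains w && need.getD w 0 != n then none
    else pvNeed rest (need.insert w n)

-- counts of the first 10-day window: 'for item in discount[:10]: cnt[item] = cnt.get(item, 0) + 1'
def pvCnt0 (discount : List String) : PySem.Dict String Int :=
  (PySem.List.slice discount none (some 10)).foldl
    (fun d x => d.insert x (d.getD x 0 + 1)) PySem.Dict.empty

-- one iteration of the main loop: slide the window (for i > 0), then test all requirements
def pvSlideStep (discount : List String) (need : PySem.Dict String Int)
    (st : PySem.Dict String Int × Int) (i : Int) : PySem.Dict String Int × Int :=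
  let cnt :=
    if 0 < i then
      let outb := PySem.List.pyGetD discount (i - 1) ""
      let c1 := st.1.insert outb (st.1.getD outb 0 - 1)
      let inb := PySem.List.pyGetD discount (i + 9) ""
      c1.insert inb (c1.getD inb 0 + 1)
    else st.1
  (cnt, if need.items.all (fun p => cnt.getD p.1 0 == p.2) then st.2 + 1 else st.2)

def solution_alt (want : List String) (number : List Int) (discount : List String) : Int :=
  match pvNeed (want.zip number) PySem.Dict.empty with
  | none => 0
  | some need =>
    if (discount.length : Int) < 10 then 0
    else
      ((PySem.List.pyRange 0 ((discount.length : Int) - 9)).foldl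
        (pvSlideStep discount need) (pvCnt0 discount, 0)).2

-- ===== PRECONDITION & SPEC =====
-- Pre_ excludes the inputs with len(want) > len(number) on which a 10-day window exists: there A reads
-- number[i] past the end of number and may raise IndexError (whether it actually raises depends on the
-- data — an earlier mismatch breaks out first — so the whole length-mismatch shape is excluded).
def Pre_solution (want : List String) (number : List Int) (discount : List String) : Prop :=
  want.length ≤ number.length ∨ discount.length < 10
instance (want : List String) (number : List Int) (discount : List String) : Decidable (Pre_solution want number discount) := by unfold Pre_solution; infer_instance

def pvWitness_solution : List String × List Int × List String :=
  (["a", "b"], [2, 1],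
   ["a", "a", "b", "c", "c", "c", "c", "c", "c", "c", "a"])

def Spec_solution (want : List String) (number : List Int) (discount : List String) (out : Int) : Prop := out = solution_alt want number discount
instance (want : List String) (number : List Int) (discount : List String) (out : Int) : Decidable (Spec_solution want number discount out) := by unfold Spec_solution; infer_instance

-- ===== CLAIM (what is proved, stated in full; the proofs are below) =====
def Claim_equal_solution : Prop := ∀ (want : List String) (number : List Int) (discount : List String), Dom_solution want number discount → Pre_solution want number discount → Spec_solution want number discount (solution want number discount)

-- ===== LEMMAS AND PROOFS =====

lemma need_persist (l : List (String × Int)) :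
    ∀ (d nd : PySem.Dict String Int), pvNeed l d = some nd →
      ∀ k v, d.get? k = some v → nd.get? k = some v := by
  induction l with
  | nil => intro d nd h k v hk; simp [pvNeed] at h; rwa [← h]
  | cons hd tl ih =>
    rintro d nd h k v hk
    obtain ⟨w, n⟩ := hd
    by_cases hg : (d.contains w && d.getD w 0 != n) = true
    · simp [pvNeed, hg] at h
    · simp only [pvNeed, hg, Bool.false_eq_true, if_false] at h
      refine ih _ _ (by simpa using h) k v ?_
      rw [PySem.Dict.get?_insert]
      by_cases hkw : k = w
      · subst hkw
        have hc : d.contains k = true := by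
          rw [PySem.Dict.contains_eq_isSome_get?, hk]; rfl
        have hgd : d.getD k 0 = v := by rw [PySem.Dict.getD_eq_get?_getD, hk]; rfl
        simp only [Bool.and_eq_true, bne_iff_ne, not_and, not_not, hc] at hg
        have hnv : n = v := by rw [← hg trivial, hgd]
        simp [hnv]
      · simp [hkw, hk]

lemma need_mem (l : List (String × Int)) :
    ∀ (d nd : PySem.Dict String Int), pvNeed l d = some nd →
      ∀ p ∈ l, nd.get? p.1 = some p.2 := by
  induction l with
  | nil => simp
  | cons hd tl ih =>
    rintro d nd h p hp
    obtain ⟨w, n⟩ := hd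
    by_cases hg : (d.contains w && d.getD w 0 != n) = true
    · simp [pvNeed, hg] at h
    · simp only [pvNeed, hg, Bool.false_eq_true, if_false] at h
      replace h : pvNeed tl (d.insert w n) = some nd := by simpa using h
      rcases List.mem_cons.mp hp with hp | hp
      · subst hp
        exact need_persist tl _ _ h w n (PySem.Dict.get?_insert_self _ _ _)
      · exact ih _ _ h p hp

lemma need_src (l : List (String × Int)) :
    ∀ (d nd : PySem.Dict String Int), pvNeed l d = some nd →
      ∀ k v, nd.get? k = some v → d.get? k = some v ∨ (k, v) ∈ l := by
  induction l with
  | nil => intro d nd h k v hk; simp [pvNeed] at h; subst h; simp [hk]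
  | cons hd tl ih =>
    rintro d nd h k v hk
    obtain ⟨w, n⟩ := hd
    by_cases hg : (d.contains w && d.getD w 0 != n) = true
    · simp [pvNeed, hg] at h
    · simp only [pvNeed, hg, Bool.false_eq_true, if_false] at h
      replace h : pvNeed tl (d.insert w n) = some nd := by simpa using h
      rcases ih _ _ h k v hk with hsrc | hmem
      · rw [PySem.Dict.get?_insert] at hsrc
        by_cases hkw : k = w
        · subst hkw; simp at hsrc; right; simp [hsrc]
        · left; rwa [if_neg hkw] at hsrc
      · right; exact List.mem_cons_of_mem _ hmem

lemma need_nodup (l : List (String × Int)) :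
    ∀ (d nd : PySem.Dict String Int), d.keys.Nodup → pvNeed l d = some nd → nd.keys.Nodup := by
  induction l with
  | nil => intro d nd hd h; simp [pvNeed] at h; rwa [← h]
  | cons hd tl ih =>
    rintro d nd hdn h
    obtain ⟨w, n⟩ := hd
    by_cases hg : (d.contains w && d.getD w 0 != n) = true
    · simp [pvNeed, hg] at h
    · simp only [pvNeed, hg, Bool.false_eq_true, if_false] at h
      exact ih _ _ (PySem.Dict.nodup_keys_insert _ _ _ hdn) (by simpa using h)

lemma need_none (l : List (String × Int)) :
    ∀ (d : PySem.Dict String Int), pvNeed l d = none →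
      ∃ k v v', v ≠ v' ∧ (d.get? k = some v ∨ (k, v) ∈ l) ∧ (k, v') ∈ l := by
  induction l with
  | nil => intro d h; simp [pvNeed] at h
  | cons hd tl ih =>
    rintro d h
    obtain ⟨w, n⟩ := hd
    by_cases hg : (d.contains w && d.getD w 0 != n) = true
    · simp only [Bool.and_eq_true, bne_iff_ne] at hg
      obtain ⟨hc, hne⟩ := hg
      refine ⟨w, d.getD w 0, n, hne, Or.inl ?_, List.mem_cons_self⟩
      rw [PySem.Dict.contains_eq_isSome_get?] at hc
      rw [PySem.Dict.getD_eq_get?_getD]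
      cases hgw : d.get? w with
      | none => rw [hgw] at hc; simp at hc
      | some x => simp
    · simp only [pvNeed, hg, Bool.false_eq_true, if_false] at h
      obtain ⟨k, v, v', hne, hsrc, hmem⟩ := ih _ h
      refine ⟨k, v, v', hne, ?_, List.mem_cons_of_mem _ hmem⟩
      rcases hsrc with hget | hmem2
      · rw [PySem.Dict.get?_insert] at hget
        by_cases hkw : k = w
        · subst hkw; simp at hget; right; simp [hget]
        · left; rwa [if_neg hkw] at hget
      · right; exact List.mem_cons_of_mem _ hmem2

lemma checkA_iff (number : List Int) (sub : List String) (l : List (Int × String)) :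
    pvCheckA number sub l = true ↔
      ∀ p ∈ l, PySem.List.pyGetD number p.1 0 = (PySem.List.count sub p.2 : Int) := by
  induction l with
  | nil => simp [pvCheckA]
  | cons hd tl ih =>
    obtain ⟨j, w⟩ := hd
    by_cases h : PySem.List.pyGetD number j 0 = (PySem.List.count sub w : Int) <;>
      simp [pvCheckA, h, ih]

lemma items_iff_zip (want : List String) (number : List Int) (need : PySem.Dict String Int)
    (hnd : pvNeed (want.zip number) PySem.Dict.empty = some need) (c : String → Int) :
    (∀ p ∈ need.items, c p.1 = p.2) ↔ (∀ p ∈ want.zip number, c p.1 = p.2) := by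
  have hnodup : need.keys.Nodup :=
    need_nodup _ _ _ (by simp [PySem.Dict.keys_empty]) hnd
  constructor
  · rintro h ⟨k, v⟩ hp
    have hg := need_mem _ _ _ hnd (k, v) hp
    exact h (k, v) (PySem.Dict.mem_items_of_get?_eq_some need hg)
  · rintro h ⟨k, v⟩ hp
    have hg : need.get? k = some v := PySem.Dict.get?_of_mem_items need hp hnodup
    rcases need_src _ _ _ hnd k v hg with hsrc | hmem
    · simp [PySem.Dict.get?_empty] at hsrc
    · exact h (k, v) hmem

lemma checkA_eq_zip (want : List String) (number : List Int) (sub : List String)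
    (hlen : want.length ≤ number.length) :
    (pvCheckA number sub (PySem.List.enumerate want) = true ↔
      ∀ p ∈ want.zip number, (PySem.List.count sub p.1 : Int) = p.2) := by
  rw [checkA_iff, PySem.List.enumerate_eq_map_pyRange want ""]
  simp only [List.forall_mem_map]
  have hz : (∀ p ∈ want.zip number, (PySem.List.count sub p.1 : Int) = p.2) ↔
      ∀ (i : Nat) (h : i < want.length),
        (PySem.List.count sub (want[i]) : Int) = number[i]'(lt_of_lt_of_le h hlen) := by
    rw [List.forall_mem_iff_forall_getElem]
    constructor
    · intro h i hi
      have := h i (by simp [List.length_zip]; omega)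
      simpa [List.getElem_zip] using this
    · intro h i hi
      have hi' : i < want.length := by simp [List.length_zip] at hi; omega
      simpa [List.getElem_zip] using h i hi'
  rw [hz]
  constructor
  · intro h i hi
    have := h (i : Int) (by simp [PySem.List.mem_pyRange_one]; omega)
    simpa [PySem.List.pyGetD_natCast, List.getD_eq_getElem, hi, lt_of_lt_of_le hi hlen] using this.symm
  · intro h j hj
    rw [PySem.List.mem_pyRange_one] at hj
    obtain ⟨hj0, hjlt⟩ := hj
    obtain ⟨i, rfl⟩ := Int.eq_ofNat_of_zero_le hj0
    have hi : i < want.length := by simp at hjlt; exact_mod_cast hjlt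
    have := h i hi
    simp only [PySem.List.pyGetD_natCast]
    rw [List.getD_eq_getElem _ _ hi, List.getD_eq_getElem _ _ (lt_of_lt_of_le hi hlen)]
    exact this.symm

-- the 10-day window starting at day t
def pvWin (L : List String) (t : Nat) : List String := (L.drop t).take 10

-- B's per-window test, phrased on the window itself
def pvMatch (need : PySem.Dict String Int) (sub : List String) : Bool :=
  need.items.all (fun p => ((sub.count p.1 : Int)) == p.2)

lemma win_cons (L : List String) (t : Nat) (h : t < L.length) :
    pvWin L t = L[t] :: (L.drop (t + 1)).take 9 := by
  rw [pvWin, List.drop_eq_getElem_cons h]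
  rfl

lemma win_snoc (L : List String) (t : Nat) (h : t + 10 < L.length) :
    pvWin L (t + 1) = (L.drop (t + 1)).take 9 ++ [L[t + 10]] := by
  have h1 : (L.drop (t + 1)).take 10 = (L.drop (t + 1)).take 9 ++ ((L.drop (t + 1))[9]?).toList :=
    List.take_add_one
  rw [pvWin, h1, List.getElem?_drop, List.getElem?_eq_getElem (by omega : t + 1 + 9 < L.length)]
  have h2 : t + 1 + 9 = t + 10 := by omega
  simp [h2]

lemma all_getD_eq (need cnt : PySem.Dict String Int) (win : List String)
    (h : ∀ k, cnt.getD k 0 = (win.count k : Int)) :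
    need.items.all (fun p => cnt.getD p.1 0 == p.2) = pvMatch need win := by
  unfold pvMatch
  congr 1
  funext p
  rw [h p.1]

lemma cnt0_getD (L : List String) (k : String) :
    (pvCnt0 L).getD k 0 = ((pvWin L 0).count k : Int) := by
  rw [pvCnt0, PySem.List.slice_to L (by norm_num : (0:Int) ≤ 10),
    PySem.Dict.getD_foldl_insert_add_one]
  simp [pvWin]

-- the sliding-window invariant: counter and match count after processing windows 0..t
lemma slideB (L : List String) (need : PySem.Dict String Int) :
    ∀ t : Nat, t + 10 ≤ L.length →
      (∀ k, ((PySem.List.pyRange 0 ((t : Int) + 1)).foldl (pvSlideStep L need) (pvCnt0 L, 0)).1.getD k 0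
          = ((pvWin L t).count k : Int)) ∧
      ((PySem.List.pyRange 0 ((t : Int) + 1)).foldl (pvSlideStep L need) (pvCnt0 L, 0)).2
          = (((List.range (t + 1)).countP (fun s => pvMatch need (pvWin L s))) : Int) := by
  intro t
  induction t with
  | zero =>
    intro _
    rw [Nat.cast_zero, PySem.List.pyRange_one_singleton 0]
    simp only [List.foldl_cons, List.foldl_nil, pvSlideStep]
    have hstep : ¬ ((0:Int) < 0) := by norm_num
    constructor
    · intro k
      simp only [hstep, if_false]
      exact cnt0_getD L k
    · simp only [hstep, if_false]
      rw [all_getD_eq need (pvCnt0 L) (pvWin L 0) (cnt0_getD L)]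
      simp [List.range_succ]
  | succ s ih =>
    intro ht
    obtain ⟨ih1, ih2⟩ := ih (by omega)
    have hcast : ((s + 1 : Nat) : Int) + 1 = (((s : Nat) : Int) + 1) + 1 := by push_cast; ring
    rw [hcast, PySem.List.pyRange_one_succ_right (by positivity), List.foldl_append,
      List.foldl_cons, List.foldl_nil]
    set r := (PySem.List.pyRange 0 ((s : Int) + 1)).foldl (pvSlideStep L need) (pvCnt0 L, 0) with hr
    have hs : s < L.length := by omega
    have hs10 : s + 10 < L.length := by omega
    have hout : PySem.List.pyGetD L ((s : Int) + 1 - 1) "" = L[s] := by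
      have : ((s : Int) + 1 - 1) = ((s : Nat) : Int) := by ring
      rw [this, PySem.List.pyGetD_natCast, List.getD_eq_getElem _ _ hs]
    have hin : PySem.List.pyGetD L ((s : Int) + 1 + 9) "" = L[s + 10] := by
      have : ((s : Int) + 1 + 9) = ((s + 10 : Nat) : Int) := by push_cast; ring
      rw [this, PySem.List.pyGetD_natCast, List.getD_eq_getElem _ _ hs10]
    have hpos : (0 : Int) < (s : Int) + 1 := by positivity
    -- the updated counter counts the shifted window
    have hcnt : ∀ k,
        ((r.1.insert L[s] (r.1.getD L[s] 0 - 1)).insert L[s + 10]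
          ((r.1.insert L[s] (r.1.getD L[s] 0 - 1)).getD L[s + 10] 0 + 1)).getD k 0
        = ((pvWin L (s + 1)).count k : Int) := by
      intro k
      have hwa : ∀ v, (pvWin L s).count v
          = ((L.drop (s + 1)).take 9).count v + (if L[s] = v then 1 else 0) := by
        intro v
        rw [win_cons L s hs, List.count_cons]
        simp [beq_iff_eq]
      have hwb : ∀ v, (pvWin L (s + 1)).count v
          = ((L.drop (s + 1)).take 9).count v + (if L[s + 10] = v then 1 else 0) := by
        intro v
        rw [win_snoc L s hs10, List.count_append]
        simp [List.count_singleton, beq_iff_eq]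
      rw [PySem.Dict.getD_insert, PySem.Dict.getD_insert, PySem.Dict.getD_insert]
      rw [ih1 k, ih1 L[s + 10]]
      rw [hwa k, hwa L[s + 10], hwb k]
      split_ifs <;> push_cast <;>
        first
        | omega
        | (subst_vars; simp_all)
    constructor
    · intro k
      simp only [pvSlideStep, hpos, if_true, hout, hin]
      exact hcnt k
    · simp only [pvSlideStep, hpos, if_true, hout, hin]
      rw [all_getD_eq need _ (pvWin L (s + 1)) hcnt, ih2]
      conv_rhs => rw [List.range_succ]
      rw [List.countP_append, List.countP_singleton]
      split_ifs <;> push_cast <;> omega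

lemma slice_window (L : List String) (t : Nat) :
    PySem.List.slice L (some (t : Int)) (some ((t : Int) + 10)) = pvWin L t := by
  have := PySem.List.slice_natCast_add L t 10
  simpa using this

-- A as a count over the window start days
lemma solutionA_eq_countP (want : List String) (number : List Int) (L : List String) :
    solution want number L
      = (((List.range (L.length - 9)).countP
          (fun t => pvCheckA number (pvWin L t) (PySem.List.enumerate want))) : Int) := by
  unfold solution
  rw [PySem.List.foldl_count_if]
  rw [PySem.List.pyRange_one]
  rw [List.countP_map]
  have hn : ((L.length : Int) - 9 - 0).toNat = L.length - 9 := by omega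
  rw [hn]
  simp only [zero_add]
  congr 1
  apply List.countP_congr
  intro t _
  rw [Function.comp_apply, slice_window L t]

lemma matchB_iff (want : List String) (number : List Int) (need : PySem.Dict String Int)
    (hnd : pvNeed (want.zip number) PySem.Dict.empty = some need) (sub : List String) :
    (pvMatch need sub = true ↔ ∀ p ∈ want.zip number, ((sub.count p.1 : Int)) = p.2) := by
  rw [pvMatch, List.all_eq_true]
  have : (∀ p ∈ need.items, ((sub.count p.1 : Int)) = p.2) ↔
      ∀ p ∈ want.zip number, ((sub.count p.1 : Int)) = p.2 :=
    items_iff_zip want number need hnd (fun k => (sub.count k : Int))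
  rw [← this]
  constructor
  · intro h p hp; have := h p hp; simpa [beq_iff_eq] using this
  · intro h p hp; simpa [beq_iff_eq] using h p hp

-- ===== VERDICT (by name: the statement is the Claim_ definition above) =====
theorem solution_spec : Claim_equal_solution := by
  unfold Claim_equal_solution
  intro want number discount _ hpre
  unfold Spec_solution
  by_cases h10 : discount.length < 10
  · have hnil : PySem.List.pyRange 0 ((discount.length : Int) - 9) = [] := by
      apply PySem.List.pyRange_one_eq_nil
      omega
    have hA : solution want number discount = 0 := by
      unfold solution; rw [hnil]; rfl
    rw [hA]
    unfold solution_alt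
    cases hn : pvNeed (want.zip number) PySem.Dict.empty with
    | none => rfl
    | some need =>
      dsimp only
      rw [if_pos (by exact_mod_cast h10)]
  · have h10' : 10 ≤ discount.length := by omega
    have hlen : want.length ≤ number.length := hpre.resolve_right h10
    rw [solutionA_eq_countP want number discount]
    unfold solution_alt
    cases hn : pvNeed (want.zip number) PySem.Dict.empty with
    | none =>
      dsimp only
      obtain ⟨k, v, v', hne, hsrc, hmem⟩ := need_none _ _ hn
      rw [PySem.Dict.get?_empty] at hsrc
      replace hsrc : (k, v) ∈ want.zip number := by
        rcases hsrc with h | h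
        · exact absurd h (by simp)
        · exact h
      have hzero : ∀ t ∈ List.range (discount.length - 9),
          ¬ (pvCheckA number (pvWin discount t) (PySem.List.enumerate want) = true) := by
        intro t _ hchk
        rw [checkA_eq_zip want number _ hlen] at hchk
        have h1 : (List.count k (pvWin discount t) : Int) = v := by
          simpa [PySem.List.count_eq] using hchk (k, v) hsrc
        have h2 : (List.count k (pvWin discount t) : Int) = v' := by
          simpa [PySem.List.count_eq] using hchk (k, v') hmem
        exact hne (by omega)
      rw [List.countP_eq_zero.mpr (by intro t ht; exact hzero t ht)]
      rfl
    | some need =>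
      dsimp only
      rw [if_neg (by exact_mod_cast not_lt.mpr h10')]
      set t := discount.length - 10 with hts
      have ht1 : t + 1 = discount.length - 9 := by omega
      have hcast : (discount.length : Int) - 9 = (t : Int) + 1 := by
        omega
      rw [hcast]
      obtain ⟨_, h2⟩ := slideB discount need t (by omega)
      rw [h2, ht1]
      congr 1
      apply List.countP_congr
      intro s hs
      rw [List.mem_range] at hs
      have hs10 : s + 10 ≤ discount.length := by omega
      rw [Bool.eq_iff_iff]
      rw [checkA_eq_zip want number _ hlen]
      rw [matchB_iff want number need hn (pvWin discount s)]
      simp [PySem.List.count_eq]
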